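-- pv_equiv track=rewrite | github.com/Javier-Villegas/AOC2021 | day18.py | is_explodable
-- ===== SOURCE A (Python) =====
-- def is_explodable(snailfish:str) -> (bool,int):
--     depth = 0
--     for i in range(len(snailfish)):
--         if snailfish[i]=='[':
--             depth+=1
--             if depth==5:
--                 return (True,i)
--         elif snailfish[i]==']':
--             depth-=1
--     return (False,0)
-- ===== SOURCE B (Python) =====
-- def is_explodable(snailfish: str) -> (bool, int):
--     # Divide-and-conquer: summarize(lo, hi) returns (delta, records) for the
--     # segment snailfish[lo:hi], where delta is its net bracket-depth change and
--     # records[m-1] is the absolute index where the segment's running depth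
--     # (counted from 0 at lo) first attains the new maximum m.  When gluing a
--     # left and a right half, a right record of relative value m is a new
--     # maximum of the glued segment iff ld + m > len(lrec); record values are
--     # consecutive, so the survivors are exactly a suffix of the right records.
--     def summarize(lo, hi):
--         if hi - lo == 1:
--             c = snailfish[lo]
--             if c == '[':
--                 return (1, [lo])
--             return (-1, []) if c == ']' else (0, [])
--         mid = (lo + hi) // 2
--         ld, lrec = summarize(lo, mid)
--         rd, rrec = summarize(mid, hi)
--         return (ld + rd, lrec + rrec[max(0, len(lrec) - ld):])
--     if not snailfish:
--         return (False, 0)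
--     rec = summarize(0, len(snailfish))[1]
--     # depth first reaches 5 exactly at the 5th new-maximum record
--     return (True, rec[4]) if len(rec) >= 5 else (False, 0)
-- ===== Notes on version B (the rewrite author's own statement) =====
-- stated objective: alternative
-- what changed: Replaces A's fused left-to-right early-exit depth counter with a divide-and-conquer algorithm: each half of the string is recursively summarized as (net depth change, list of first new-maximum-depth positions), halves are merged by keeping the suffix of the right records that rise above the left maximum, and the answer is read off as the 5th record.
import Mathlib
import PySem

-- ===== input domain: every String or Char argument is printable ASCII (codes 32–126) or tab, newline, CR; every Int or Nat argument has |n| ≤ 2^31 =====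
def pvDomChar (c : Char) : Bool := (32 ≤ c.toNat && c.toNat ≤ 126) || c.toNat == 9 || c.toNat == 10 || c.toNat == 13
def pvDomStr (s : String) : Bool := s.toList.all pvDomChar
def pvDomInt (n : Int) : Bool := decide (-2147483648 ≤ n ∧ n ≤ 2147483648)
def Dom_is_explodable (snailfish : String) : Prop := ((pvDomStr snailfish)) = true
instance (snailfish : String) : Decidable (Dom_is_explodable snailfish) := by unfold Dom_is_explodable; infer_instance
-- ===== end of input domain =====

-- B replaces A's fused early-exit depth-counter scan with a divide-and-conquer
-- summary (net depth change + new-maximum record list) merged per half; an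
-- alternative algorithm of similar cost, not claimed faster.


-- ===== PORT A =====
-- A's loop over the characters carrying (depth, current index).
def isExplodableGoA : List Char → Int → Int → Bool × Int
  | [], _, _ => (false, 0)
  | c :: rest, depth, i =>
    if c = '[' then
      if depth + 1 = 5 then (true, i) else isExplodableGoA rest (depth + 1) (i + 1)
    else if c = ']' then isExplodableGoA rest (depth - 1) (i + 1)
    else isExplodableGoA rest depth (i + 1)

def is_explodable (snailfish : String) : Bool × Int :=
  isExplodableGoA snailfish.toList 0 0

-- ===== PORT B =====
-- one-character summary: (depth delta, records of new-maximum positions)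
def pvSingle (c : Char) (lo : Int) : Int × List Int :=
  if c = '[' then (1, [lo]) else if c = ']' then (-1, ([] : List Int)) else (0, [])

-- merge of two adjacent summaries: Source B's 'lrec + rrec[max(0, len(lrec) - ld):]'
def pvCombine (L R : Int × List Int) : Int × List Int :=
  (L.1 + R.1, L.2 ++ R.2.drop (max 0 ((L.2.length : Int) - L.1)).toNat)

-- Source B's summarize(lo, hi), transcribed on the segment's character list with
-- absolute offset lo; the midpoint split (lo+hi)//2 becomes take/drop at length/2.
def pvSummarize : List Char → Int → Int × List Int
  | [], _ => (0, [])          -- unreachable: summarize is only called with hi - lo ≥ 1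
  | [c], lo => pvSingle c lo
  | c₁ :: c₂ :: rest, lo =>
    let k := (c₁ :: c₂ :: rest).length / 2
    pvCombine (pvSummarize ((c₁ :: c₂ :: rest).take k) lo)
              (pvSummarize ((c₁ :: c₂ :: rest).drop k) (lo + (k : Int)))
termination_by cs _ => cs.length
decreasing_by
  · simp [List.length_take]; omega
  · simp [List.length_drop]; omega

def is_explodable_alt (snailfish : String) : Bool × Int :=
  -- Python's 'if not snailfish: return (False, 0)'
  if snailfish.toList.isEmpty then (false, 0)
  else
    let r := (pvSummarize snailfish.toList 0).2
    -- Python's rec[4] under the 'len(rec) >= 5' guard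
    if 5 ≤ r.length then (true, r.getD 4 0) else (false, 0)

-- ===== PRECONDITION & SPEC =====
def Spec_is_explodable (snailfish : String) (out : Bool × Int) : Prop := out = is_explodable_alt snailfish
instance (snailfish : String) (out : Bool × Int) : Decidable (Spec_is_explodable snailfish out) := by unfold Spec_is_explodable; infer_instance

-- ===== CLAIM (what is proved, stated in full; the proofs are below) =====
def Claim_equal_is_explodable : Prop := ∀ (snailfish : String), Dom_is_explodable snailfish → Spec_is_explodable snailfish (is_explodable snailfish)

-- ===== LEMMAS AND PROOFS =====

-- sequential (right-fold) form of the summary, the bridge between A and B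
def pvF : List Char → Int → Int × List Int
  | [], _ => (0, [])
  | c :: cs, lo => pvCombine (pvSingle c lo) (pvF cs (lo + 1))

theorem pvSingle_inv (c : Char) (lo : Int) : (pvSingle c lo).1 ≤ (pvSingle c lo).2.length := by
  unfold pvSingle; split_ifs <;> simp

theorem pvCombine_inv (L R : Int × List Int) (hL : L.1 ≤ L.2.length) (hR : R.1 ≤ R.2.length) :
    (pvCombine L R).1 ≤ (pvCombine L R).2.length := by
  obtain ⟨d1, r1⟩ := L; obtain ⟨d2, r2⟩ := R
  simp only [pvCombine, List.length_append, List.length_drop] at *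
  omega

theorem pvF_inv (cs : List Char) : ∀ lo : Int, (pvF cs lo).1 ≤ (pvF cs lo).2.length := by
  induction cs with
  | nil => intro lo; simp [pvF]
  | cons c rest ih =>
    intro lo
    exact pvCombine_inv _ _ (pvSingle_inv c lo) (ih (lo + 1))

theorem pvCombine_nil_left (R : Int × List Int) : pvCombine (0, []) R = R := by
  simp [pvCombine]

theorem pvCombine_nil_right (L : Int × List Int) : pvCombine L (0, []) = L := by
  simp [pvCombine]

theorem pvMaxToNat (x : Int) : (max 0 x).toNat = x.toNat := by
  rcases le_total 0 x with h | h
  · rw [max_eq_right h]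
  · simp [max_eq_left h, Int.toNat_of_nonpos h]

theorem pvCombine_assoc (a b c : Int × List Int)
    (ha : a.1 ≤ a.2.length) (hb : b.1 ≤ b.2.length) :
    pvCombine (pvCombine a b) c = pvCombine a (pvCombine b c) := by
  obtain ⟨d1, r1⟩ := a; obtain ⟨d2, r2⟩ := b; obtain ⟨d3, r3⟩ := c
  simp only at ha hb
  simp only [pvCombine, List.length_append, List.length_drop, pvMaxToNat, Prod.mk.injEq]
  refine ⟨by ring, ?_⟩
  by_cases h : ((r1.length : Int) - d1).toNat ≤ r2.length
  · rw [List.drop_append_of_le_length h, List.append_assoc]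
    have hK : ((↑(r1.length + (r2.length - ((r1.length : Int) - d1).toNat)) : Int) - (d1 + d2)).toNat
        = ((r2.length : Int) - d2).toNat := by omega
    rw [hK]
  · rw [List.drop_append, List.drop_drop]
    have he : r2.drop ((r1.length : Int) - d1).toNat = [] := by
      rw [List.drop_eq_nil_iff]; omega
    rw [he, List.nil_append, List.append_assoc]
    have hK : ((↑(r1.length + (r2.length - ((r1.length : Int) - d1).toNat)) : Int) - (d1 + d2)).toNat
        = ((r2.length : Int) - d2).toNat + (((r1.length : Int) - d1).toNat - r2.length) := by omega
    rw [hK, List.nil_append]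

theorem pvF_append (xs : List Char) : ∀ (ys : List Char) (lo : Int),
    pvF (xs ++ ys) lo = pvCombine (pvF xs lo) (pvF ys (lo + (xs.length : Int))) := by
  induction xs with
  | nil => intro ys lo; simp [pvF, pvCombine_nil_left]
  | cons x rest ih =>
    intro ys lo
    simp only [List.cons_append, pvF]
    rw [ih ys (lo + 1), ← pvCombine_assoc _ _ _ (pvSingle_inv x lo) (pvF_inv rest (lo + 1))]
    congr 2
    rw [List.length_cons]
    push_cast
    ring

theorem pvSummarize_eq_F (n : ℕ) : ∀ (cs : List Char), cs.length = n → ∀ lo : Int,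
    pvSummarize cs lo = pvF cs lo := by
  induction n using Nat.strong_induction_on with
  | _ n ih =>
    intro cs hn lo
    match cs with
    | [] => simp [pvSummarize, pvF]
    | [c] => simp [pvSummarize, pvF, pvCombine_nil_right]
    | c₁ :: c₂ :: rest =>
      have hlen : rest.length + 2 = n := by simpa using hn
      rw [pvSummarize]
      have htl : ((c₁ :: c₂ :: rest).take ((c₁ :: c₂ :: rest).length / 2)).length
          = (c₁ :: c₂ :: rest).length / 2 := by
        rw [List.length_take]; simp; omega
      have hdl : ((c₁ :: c₂ :: rest).drop ((c₁ :: c₂ :: rest).length / 2)).length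
          = (c₁ :: c₂ :: rest).length - (c₁ :: c₂ :: rest).length / 2 := by
        rw [List.length_drop]
      rw [ih _ (by simp; omega) _ htl lo,
          ih _ (by simp; omega) _ hdl (lo + (((c₁ :: c₂ :: rest).length / 2 : ℕ) : Int))]
      have happ := pvF_append ((c₁ :: c₂ :: rest).take ((c₁ :: c₂ :: rest).length / 2))
        ((c₁ :: c₂ :: rest).drop ((c₁ :: c₂ :: rest).length / 2)) lo
      rw [List.take_append_drop, htl] at happ
      rw [← happ]

theorem goA_eq_F (cs : List Char) : ∀ (d i : Int), d < 5 →
    isExplodableGoA cs d i =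
      match (pvF cs i).2[(4 - d).toNat]? with
      | some j => (true, j)
      | none => (false, 0) := by
  induction cs with
  | nil => intro d i _; simp [isExplodableGoA, pvF]
  | cons c rest ih =>
    intro d i hd
    simp only [pvF]
    by_cases hc : c = '['
    · subst hc
      have hs : pvSingle '[' i = (1, [i]) := by simp [pvSingle]
      rw [hs]
      have hcm : (pvCombine (1, [i]) (pvF rest (i + 1))).2 = i :: (pvF rest (i + 1)).2 := by
        simp [pvCombine]
      by_cases h5 : d + 1 = 5
      · have h0 : (4 - d).toNat = 0 := by omega
        simp [isExplodableGoA, h5, hcm, h0]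
      · have hidx : (4 - d).toNat = (4 - (d + 1)).toNat + 1 := by omega
        simp only [isExplodableGoA, h5, if_false]
        rw [ih (d + 1) (i + 1) (by omega), hcm, hidx]
        simp
    · by_cases hcr : c = ']'
      · subst hcr
        have hs : pvSingle ']' i = (-1, []) := by simp [pvSingle]
        rw [hs]
        have hcm : (pvCombine (-1, ([] : List Int)) (pvF rest (i + 1))).2 =
            (pvF rest (i + 1)).2.drop 1 := by
          simp [pvCombine]
        rw [show isExplodableGoA (']' :: rest) d i = isExplodableGoA rest (d - 1) (i + 1) by
          simp [isExplodableGoA]]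
        rw [ih (d - 1) (i + 1) (by omega), hcm]
        rw [List.getElem?_drop]
        have h1 : 1 + (4 - d).toNat = (4 - (d - 1)).toNat := by omega
        rw [h1]
      · have hs : pvSingle c i = (0, []) := by simp [pvSingle, hc, hcr]
        rw [hs, pvCombine_nil_left]
        rw [show isExplodableGoA (c :: rest) d i = isExplodableGoA rest d (i + 1) by
          simp [isExplodableGoA, hc, hcr]]
        exact ih d (i + 1) hd

-- ===== VERDICT (by name: the statement is the Claim_ definition above) =====
theorem is_explodable_spec : Claim_equal_is_explodable := by
  intro s _
  unfold Spec_is_explodable is_explodable is_explodable_alt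
  cases hl : s.toList with
  | nil => simp [isExplodableGoA]
  | cons c rest =>
    rw [goA_eq_F _ 0 0 (by norm_num)]
    simp only [List.isEmpty_cons, if_false, Bool.false_eq_true]
    rw [pvSummarize_eq_F (c :: rest).length _ rfl]
    have h4 : ((4 : Int) - 0).toNat = 4 := by decide
    rw [h4]
    set r := (pvF (c :: rest) 0).2 with hr
    by_cases h : 5 ≤ r.length
    · have hg : r[(4 : Nat)]? = some (r.getD 4 0) := by
        rw [List.getElem?_eq_getElem (by omega)]
        simp [List.getD, List.getElem?_eq_getElem (show 4 < r.length by omega)]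
      rw [hg, if_pos h]
    · have hg : r[(4 : Nat)]? = none := by
        rw [List.getElem?_eq_none]; omega
      rw [hg, if_neg h]
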